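-- pv_equiv track=rewrite | github.com/Data-to-Insight-Center/cyberinfrastructure-knowledge-network | patra_agent/edge_device/rest_generator.py | split_data_by_timestamp
-- ===== SOURCE A (Python) =====
-- def split_data_by_timestamp(data):
--     timestamp = data[0][-1]
--     split_data = []
--     single_split = []
--     for row in data:
--         if row[-1] == timestamp:
--             single_split.append(row)
--         else:
--             split_data.append(single_split)
--             single_split = []
--             single_split.append(row)
--             timestamp = row[-1]
--     split_data.append(single_split)
--     return split_data
-- ===== SOURCE B (Python) =====
-- def split_data_by_timestamp(data):
--     n = len(data)
--     cuts = [0] + [i for i in range(1, n) if data[i][-1] != data[i - 1][-1]] + [n]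
--     return [data[a:b] for a, b in zip(cuts, cuts[1:])]
-- ===== Notes on version B (the rewrite author's own statement) =====
-- stated objective: idiomatic
-- what changed: A's single accumulate-and-flush loop over rows is replaced by two passes: first collect the boundary indices where the trailing timestamp changes, then slice the list between consecutive boundaries.
import Mathlib
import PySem

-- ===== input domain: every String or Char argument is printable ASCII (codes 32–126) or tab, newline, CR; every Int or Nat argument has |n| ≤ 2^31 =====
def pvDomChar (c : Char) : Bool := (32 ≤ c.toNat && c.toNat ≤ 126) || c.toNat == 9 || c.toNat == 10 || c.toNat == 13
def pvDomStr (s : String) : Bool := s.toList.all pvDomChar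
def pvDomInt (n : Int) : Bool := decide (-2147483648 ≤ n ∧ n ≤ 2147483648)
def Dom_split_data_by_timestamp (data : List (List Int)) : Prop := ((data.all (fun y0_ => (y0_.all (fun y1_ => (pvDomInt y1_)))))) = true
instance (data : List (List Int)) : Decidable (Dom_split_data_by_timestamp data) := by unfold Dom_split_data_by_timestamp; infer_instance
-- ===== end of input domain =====

-- B replaces A's accumulate-and-flush loop by two passes: collect the boundary indices
-- where the trailing timestamp changes, then slice data between consecutive boundaries
-- (objective: idiomatic; same O(n) cost).

-- ===== PORT A =====
-- the loop body of A (if row[-1] == timestamp: append; else: flush and restart)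
def pvStepA (st : Int × List (List (List Int)) × List (List Int)) (row : List Int) :
    Int × List (List (List Int)) × List (List Int) :=
  if (PySem.List.pyGet? row (-1)).getD 0 = st.1 then
    (st.1, st.2.1, st.2.2 ++ [row])
  else
    ((PySem.List.pyGet? row (-1)).getD 0, st.2.1 ++ [st.2.2], [row])

def split_data_by_timestamp (data : List (List Int)) : List (List (List Int)) :=
  -- timestamp = data[0][-1]  (data[0] raises on empty data: excluded by Pre_, default here)
  let timestamp := (PySem.List.pyGet? ((PySem.List.pyGet? data 0).getD []) (-1)).getD 0
  let st := data.foldl pvStepA (timestamp, [], [])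
  st.2.1 ++ [st.2.2]

-- ===== PORT B =====
-- data[i][-1] with defaults (both indexings in range under Pre_)
def pvTsAt (d : List (List Int)) (i : Int) : Int :=
  (PySem.List.pyGet? ((PySem.List.pyGet? d i).getD []) (-1)).getD 0

def split_data_by_timestamp_alt (data : List (List Int)) : List (List (List Int)) :=
  let n : Int := data.length
  let cuts : List Int :=
    [0] ++ (PySem.List.pyRange 1 n 1).filter (fun i => pvTsAt data i != pvTsAt data (i - 1)) ++ [n]
  (cuts.zip (PySem.List.slice cuts (some 1) none)).map
    (fun ab => PySem.List.slice data (some ab.1) (some ab.2))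

-- ===== PRECONDITION & SPEC =====
-- Pre_ excludes exactly the inputs on which Python A raises IndexError:
-- empty data (data[0]) and any empty row (row[-1]).
def Pre_split_data_by_timestamp (data : List (List Int)) : Prop :=
  data ≠ [] ∧ ∀ row ∈ data, row ≠ []
instance (data : List (List Int)) : Decidable (Pre_split_data_by_timestamp data) := by
  unfold Pre_split_data_by_timestamp; infer_instance

def pvWitness_split_data_by_timestamp : List (List Int) := [[1, 10], [2, 10], [3, 20]]

def Spec_split_data_by_timestamp (data : List (List Int)) (out : List (List (List Int))) : Prop := out = split_data_by_timestamp_alt data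
instance (data : List (List Int)) (out : List (List (List Int))) : Decidable (Spec_split_data_by_timestamp data out) := by unfold Spec_split_data_by_timestamp; infer_instance

-- ===== CLAIM (what is proved, stated in full; the proofs are below) =====
def Claim_equal_split_data_by_timestamp : Prop := ∀ (data : List (List Int)), Dom_split_data_by_timestamp data → Pre_split_data_by_timestamp data → Spec_split_data_by_timestamp data (split_data_by_timestamp data)

-- ===== LEMMAS AND PROOFS =====

-- the trailing timestamp of a row (row[-1], default 0)
def pvTs (r : List Int) : Int := (PySem.List.pyGet? r (-1)).getD 0

-- reference grouping: consecutive rows with equal trailing timestamp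
def pvGroups : List (List Int) → List (List (List Int))
  | [] => []
  | r :: rest =>
    match pvGroups rest with
    | [] => [[r]]
    | h :: t => if pvTs (h.head?.getD []) = pvTs r then (r :: h) :: t else [r] :: h :: t

theorem pvGroups_head (x : List Int) (xs : List (List Int)) :
    ∃ h t, pvGroups (x :: xs) = (x :: h) :: t := by
  cases hg : pvGroups xs with
  | nil => exact ⟨[], [], by simp [pvGroups, hg]⟩
  | cons g gs =>
    by_cases hc : pvTs (g.head?.getD []) = pvTs x
    · exact ⟨g, gs, by simp [pvGroups, hg, hc]⟩
    · exact ⟨[], g :: gs, by simp [pvGroups, hg, hc]⟩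

-- A's flush-at-end result relative to the reference grouping
def pvAttach (t : Int) (cur : List (List Int)) (gs : List (List (List Int))) :
    List (List (List Int)) :=
  match gs with
  | [] => [cur]
  | h :: t' => if pvTs (h.head?.getD []) = t then (cur ++ h) :: t' else cur :: h :: t'

theorem pvFoldA (xs : List (List Int)) : ∀ (t : Int) (acc : List (List (List Int)))
    (cur : List (List Int)),
    (xs.foldl pvStepA (t, acc, cur)).2.1 ++ [(xs.foldl pvStepA (t, acc, cur)).2.2]
      = acc ++ pvAttach t cur (pvGroups xs) := by
  induction xs with
  | nil => intro t acc cur; simp [pvAttach, pvGroups]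
  | cons r rest ih =>
    intro t acc cur
    rw [List.foldl_cons]
    by_cases hr : pvTs r = t
    · have hstep : pvStepA (t, acc, cur) r = (t, acc, cur ++ [r]) := by
        simp only [pvStepA]; rw [if_pos (show (PySem.List.pyGet? r (-1)).getD 0 = t from hr)]
      rw [hstep, ih]
      cases hg : pvGroups rest with
      | nil => simp [pvAttach, pvGroups, hg, hr]
      | cons h t' =>
        by_cases hc : pvTs (h.head?.getD []) = pvTs r
        · simp [pvAttach, pvGroups, hg, hc, hr]
        · have hc' : ¬ pvTs (h.head?.getD []) = t := fun h' => hc (h'.trans hr.symm)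
          simp [pvAttach, pvGroups, hg, hr, hc']
    · have hstep : pvStepA (t, acc, cur) r = (pvTs r, acc ++ [cur], [r]) := by
        simp only [pvStepA]; rw [if_neg (show ¬ (PySem.List.pyGet? r (-1)).getD 0 = t from hr)]
        rfl
      rw [hstep, ih]
      cases hg : pvGroups rest with
      | nil => simp [pvAttach, pvGroups, hg, hr]
      | cons h t' =>
        by_cases hc : pvTs (h.head?.getD []) = pvTs r
        · simp [pvAttach, pvGroups, hg, hc, hr]
        · simp [pvAttach, pvGroups, hg, hc, hr]

theorem pvA_eq_groups (d : List Int) (ds : List (List Int)) :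
    split_data_by_timestamp (d :: ds) = pvGroups (d :: ds) := by
  obtain ⟨h, t', hg⟩ := pvGroups_head d ds
  show ((d :: ds).foldl pvStepA _).2.1 ++ [((d :: ds).foldl pvStepA _).2.2] = _
  rw [pvFoldA]
  simp [hg, pvAttach, pvTs]

-- ---------- B side ----------

-- shifting an index past the head row
theorem pvTsAt_shift (x : List Int) (xs : List (List Int)) (n : Nat) :
    pvTsAt (x :: xs) (1 + (n : Int)) = pvTsAt xs n := by
  simp only [pvTsAt]
  rw [add_comm, PySem.List.pyGet?_cons_succ]

theorem pvTsAt_zero (x : List Int) (xs : List (List Int)) :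
    pvTsAt (x :: xs) 0 = pvTs x := by
  simp [pvTsAt, pvTs]

-- the boundary list, normalised to a map over a filtered Nat range
def pvCutsN (d : List (List Int)) : List Int :=
  ((List.range (d.length - 1)).filter
    (fun (k : Nat) => pvTsAt d (1 + (k : Int)) != pvTsAt d ((k : Int)))).map
      (fun (k : Nat) => (1 : Int) + (k : Int))

theorem pvFilter_eq_cutsN (d : List (List Int)) :
    (PySem.List.pyRange 1 (d.length : Int) 1).filter
        (fun i => pvTsAt d i != pvTsAt d (i - 1)) = pvCutsN d := by
  rw [PySem.List.pyRange_one, List.filter_map,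
    show ((d.length : Int) - 1).toNat = d.length - 1 by omega]
  unfold pvCutsN
  congr 1
  apply List.filter_congr
  intro k _
  simp only [Function.comp_apply]
  rw [show (1 : Int) + (k : Int) - 1 = (k : Int) by ring]

theorem pvCutsN_nonneg (d : List (List Int)) : ∀ c ∈ pvCutsN d, 0 ≤ c := by
  intro c hc
  obtain ⟨k, _, rfl⟩ := List.mem_map.mp hc
  omega

theorem pvCutsN_shift (r s : List Int) (rest2 : List (List Int)) :
    pvCutsN (r :: s :: rest2)
      = (if pvTs s != pvTs r then [(1 : Int)] else [])
        ++ (pvCutsN (s :: rest2)).map (· + 1) := by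
  have hP0 : (pvTsAt (r :: s :: rest2) (1 + ((0 : Nat) : Int)) !=
      pvTsAt (r :: s :: rest2) (((0 : Nat) : Int))) = (pvTs s != pvTs r) := by
    have e := pvTsAt_shift r (s :: rest2) 0
    simp only [Nat.cast_zero, add_zero] at e ⊢
    rw [e, pvTsAt_zero, pvTsAt_zero]
  have hcomp : ∀ k ∈ List.range ((s :: rest2).length - 1),
      ((fun (k : Nat) => pvTsAt (r :: s :: rest2) (1 + (k : Int)) !=
          pvTsAt (r :: s :: rest2) ((k : Int))) ∘ Nat.succ) k
        = (fun (k : Nat) => pvTsAt (s :: rest2) (1 + (k : Int)) !=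
          pvTsAt (s :: rest2) ((k : Int))) k := by
    intro k _
    simp only [Function.comp_apply]
    have e1 : pvTsAt (r :: s :: rest2) (1 + ((Nat.succ k : Nat) : Int))
        = pvTsAt (s :: rest2) ((Nat.succ k : Nat) : Int) := pvTsAt_shift r (s :: rest2) (Nat.succ k)
    have e2 : ((Nat.succ k : Nat) : Int) = 1 + (k : Int) := by push_cast; ring
    rw [e1, e2, pvTsAt_shift r (s :: rest2) k]
  simp only [pvCutsN]
  rw [show (r :: s :: rest2).length - 1 = ((s :: rest2).length - 1) + 1 by simp,
    List.range_succ_eq_map, List.filter_cons]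
  simp only [hP0]
  by_cases hcnd : (pvTs s != pvTs r) = true
  · rw [if_pos hcnd, if_pos hcnd]
    simp only [List.map_cons, Nat.cast_zero, add_zero, List.singleton_append, List.cons.injEq]
    refine ⟨trivial, ?_⟩
    rw [List.filter_map, List.filter_congr hcomp, List.map_map, List.map_map]
    apply List.map_congr_left
    intro k _
    simp only [Function.comp_apply]
    push_cast
    ring
  · rw [if_neg hcnd, if_neg hcnd]
    simp only [List.nil_append]
    rw [List.filter_map, List.filter_congr hcomp, List.map_map, List.map_map]
    apply List.map_congr_left
    intro k _
    simp only [Function.comp_apply]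
    push_cast
    ring

-- slicing data between consecutive cuts
def pvSliceAll (d : List (List Int)) (cuts : List Int) : List (List (List Int)) :=
  (cuts.zip cuts.tail).map (fun ab => PySem.List.slice d (some ab.1) (some ab.2))

theorem pvSlice_zero_succ (r : List Int) (rest : List (List Int)) (c : Int) (hc : 0 ≤ c) :
    PySem.List.slice (r :: rest) (some 0) (some (c + 1))
      = r :: PySem.List.slice rest (some 0) (some c) := by
  rw [PySem.List.slice_toNat _ le_rfl (by omega), PySem.List.slice_toNat _ le_rfl hc]
  have : (c + 1).toNat = c.toNat + 1 := by omega
  simp [this]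

theorem pvSlice_succ_succ (r : List Int) (rest : List (List Int)) (a b : Int)
    (ha : 0 ≤ a) (hb : 0 ≤ b) :
    PySem.List.slice (r :: rest) (some (a + 1)) (some (b + 1))
      = PySem.List.slice rest (some a) (some b) := by
  rw [PySem.List.slice_toNat _ (by omega) (by omega), PySem.List.slice_toNat _ ha hb]
  have h1 : (a + 1).toNat = a.toNat + 1 := by omega
  simp only [h1, List.drop_succ_cons]
  congr 1
  omega

theorem pvSlice_zero_zero (d : List (List Int)) :
    PySem.List.slice d (some 0) (some 0) = [] := by
  rw [PySem.List.slice_toNat _ le_rfl le_rfl]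
  simp

theorem pvSliceAll_shift (r : List Int) (rest : List (List Int)) (cs : List Int)
    (hnn : ∀ c ∈ cs, 0 ≤ c) :
    pvSliceAll (r :: rest) (0 :: cs.map (· + 1))
      = match pvSliceAll rest (0 :: cs) with
        | [] => []
        | h :: t => (r :: h) :: t := by
  cases cs with
  | nil => simp [pvSliceAll]
  | cons c cs2 =>
    have hc : 0 ≤ c := hnn c (by simp)
    simp only [pvSliceAll, List.map_cons, List.tail_cons, List.zip_cons_cons, List.map_cons]
    rw [pvSlice_zero_succ r rest c hc,
      show ((c + 1) :: cs2.map (· + 1)) = (c :: cs2).map (· + 1) by simp,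
      List.zip_map, List.map_map]
    congr 1
    apply List.map_congr_left
    intro ab hab
    obtain ⟨h1, h2⟩ := List.of_mem_zip hab
    have ha : 0 ≤ ab.1 := hnn ab.1 h1
    have hb : 0 ≤ ab.2 := hnn ab.2 (List.mem_cons_of_mem c h2)
    cases ab with
    | mk a b =>
      simp only [Function.comp_apply, Prod.map_apply]
      exact pvSlice_succ_succ r rest a b ha hb

-- B's whole computation as slicing at the normalised cut list
theorem pvAlt_eq_sliceAll (d : List (List Int)) :
    split_data_by_timestamp_alt d
      = pvSliceAll d (0 :: (pvCutsN d ++ [(d.length : Int)])) := by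
  simp only [split_data_by_timestamp_alt, pvSliceAll, PySem.List.slice_from_one,
    pvFilter_eq_cutsN]
  rfl

theorem pvB_eq_groups (data : List (List Int)) (hne : data ≠ []) :
    split_data_by_timestamp_alt data = pvGroups data := by
  induction data with
  | nil => exact absurd rfl hne
  | cons r rest ih =>
    cases rest with
    | nil =>
      rw [pvAlt_eq_sliceAll]
      have hcuts : pvCutsN [r] = [] := by simp [pvCutsN]
      rw [hcuts]
      simp only [List.nil_append, List.length_cons, List.length_nil, Nat.zero_add,
        Nat.cast_one, pvSliceAll, List.tail_cons, List.zip_cons_cons, List.zip_nil_right,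
        List.map_cons, List.map_nil]
      rw [PySem.List.slice_toNat _ le_rfl (by norm_num)]
      simp [pvGroups]
    | cons s rest2 =>
      have hrest : split_data_by_timestamp_alt (s :: rest2) = pvGroups (s :: rest2) :=
        ih (by simp)
      obtain ⟨h, t, hg⟩ := pvGroups_head s rest2
      have hsliceRest : pvSliceAll (s :: rest2)
          (0 :: (pvCutsN (s :: rest2) ++ [((s :: rest2).length : Int)]))
          = (s :: h) :: t := by
        rw [← pvAlt_eq_sliceAll, hrest, hg]
      have hcsnn : ∀ c ∈ pvCutsN (s :: rest2) ++ [((s :: rest2).length : Int)], 0 ≤ c := by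
        intro c hcmem
        rcases List.mem_append.mp hcmem with hi | hi
        · exact pvCutsN_nonneg _ c hi
        · simp only [List.mem_singleton] at hi; omega
      rw [pvAlt_eq_sliceAll, pvCutsN_shift]
      have hlen : (((r :: s :: rest2).length : Int)) = ((s :: rest2).length : Int) + 1 := by
        simp
      by_cases hcond : (pvTs s != pvTs r) = true
      · -- new group in front
        have hshape : (if pvTs s != pvTs r then [(1 : Int)] else [])
              ++ (pvCutsN (s :: rest2)).map (· + 1) ++ [((r :: s :: rest2).length : Int)]
            = ((0 : Int) :: (pvCutsN (s :: rest2) ++ [((s :: rest2).length : Int)])).map (· + 1) := by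
          rw [if_pos hcond, hlen]
          simp
        rw [hshape, pvSliceAll_shift r (s :: rest2) _ (by
          intro c hcmem
          rcases List.mem_cons.mp hcmem with rfl | hi
          · exact le_rfl
          · exact hcsnn c hi)]
        have hzz : pvSliceAll (s :: rest2)
            (0 :: 0 :: (pvCutsN (s :: rest2) ++ [((s :: rest2).length : Int)]))
            = [] :: pvSliceAll (s :: rest2)
                (0 :: (pvCutsN (s :: rest2) ++ [((s :: rest2).length : Int)])) := by
          simp only [pvSliceAll, List.tail_cons, List.zip_cons_cons, List.map_cons]
          rw [pvSlice_zero_zero]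
        rw [hzz, hsliceRest]
        have hne0 : ¬ pvTs s = pvTs r := bne_iff_ne.mp hcond
        conv_rhs => rw [pvGroups, hg]
        simp [hne0]
      · -- the head row joins the first group
        have hshape : (if pvTs s != pvTs r then [(1 : Int)] else [])
              ++ (pvCutsN (s :: rest2)).map (· + 1) ++ [((r :: s :: rest2).length : Int)]
            = ((pvCutsN (s :: rest2) ++ [((s :: rest2).length : Int)])).map (· + 1) := by
          rw [if_neg hcond, hlen]
          simp
        rw [hshape, pvSliceAll_shift r (s :: rest2) _ hcsnn, hsliceRest]
        have h0 : pvTs s = pvTs r := by simpa using hcond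
        conv_rhs => rw [pvGroups, hg]
        simp [h0]

-- ===== VERDICT (by name: the statement is the Claim_ definition above) =====
theorem split_data_by_timestamp_spec : Claim_equal_split_data_by_timestamp := by
  intro data _ hpre
  obtain ⟨hne, _⟩ := hpre
  obtain ⟨d, ds, rfl⟩ := List.exists_cons_of_ne_nil hne
  show split_data_by_timestamp (d :: ds) = split_data_by_timestamp_alt (d :: ds)
  rw [pvA_eq_groups, pvB_eq_groups _ (by simp)]
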